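-- pv_equiv track=rewrite | github.com/hhhddyy/Software_debugger | crosstab.py | count
-- ===== SOURCE A (Python) =====
-- def count(s, r):
--     Ncs, Nus, Ncf, Nuf = 0, 0, 0, 0
--     for i in range(len(s)-1):
--         if r[i] == 0:
--             if s[i] == 1:
--                 Ncs += 1
--             else:
--                 Nus += 1
--         else:
--             if s[i] == 1:
--                 Ncf += 1
--             else:
--                 Nuf += 1
--     Nc = Ncs + Ncf
--     Nu = Nus + Nuf
--     Ns = Ncs + Nus
--     Nf = Ncf + Nuf
--     N = Nc + Nu
--     return Ncs, Nus, Ncf, Nuf, Nc, Nu, Ns, Nf, N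
-- ===== SOURCE B (Python) =====
-- def count(s, r):
--     # Staged computation: first materialise the (s[i], r[i]) pairs for the
--     # considered indices, then count each of the four joint cells by an
--     # independent filtered pass, and finally sum the marginals.
--     pairs = [(s[i], r[i]) for i in range(len(s) - 1)]
--     Ncs = sum(1 for si, ri in pairs if si == 1 and ri == 0)
--     Nus = sum(1 for si, ri in pairs if si != 1 and ri == 0)
--     Ncf = sum(1 for si, ri in pairs if si == 1 and ri != 0)
--     Nuf = sum(1 for si, ri in pairs if si != 1 and ri != 0)
--     Nc = Ncs + Ncf
--     Nu = Nus + Nuf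
--     Ns = Ncs + Nus
--     Nf = Ncf + Nuf
--     N = Nc + Nu
--     return Ncs, Nus, Ncf, Nuf, Nc, Nu, Ns, Nf, N
-- ===== Notes on version B (the rewrite author's own statement) =====
-- stated objective: alternative
-- what changed: A makes one pass with four mutable counters and a nested if-classification per element; B instead materialises the (s[i], r[i]) pair list once and then computes each joint cell as an independent filtered count over that list (staged passes, no mutable classification state), summing marginals at the end.
import Mathlib
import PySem

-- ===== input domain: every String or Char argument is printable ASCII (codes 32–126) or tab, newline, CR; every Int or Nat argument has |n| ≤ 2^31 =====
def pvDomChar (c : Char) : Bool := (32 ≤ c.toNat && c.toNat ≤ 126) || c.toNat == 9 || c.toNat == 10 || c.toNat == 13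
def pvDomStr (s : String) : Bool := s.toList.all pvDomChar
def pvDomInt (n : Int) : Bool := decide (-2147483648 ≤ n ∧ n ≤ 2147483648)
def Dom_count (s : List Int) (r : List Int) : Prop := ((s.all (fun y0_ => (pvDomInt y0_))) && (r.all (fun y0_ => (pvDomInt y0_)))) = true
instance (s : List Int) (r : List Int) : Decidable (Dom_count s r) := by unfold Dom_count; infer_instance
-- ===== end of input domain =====

-- B replaces A's single stateful classification loop by a staged computation: build the
-- pair list once, then count each joint cell with an independent filtered pass. Same value.

-- ===== PORT A =====
-- loop body of A: state (Ncs, Nus, Ncf, Nuf); r[i]/s[i] are in range on Pre_ (outside it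
-- Python raises IndexError, excluded by Pre_count; getD 0 only makes the port total)
def countStepA (s : List Int) (r : List Int) (st : Int × Int × Int × Int) (i : Int) : Int × Int × Int × Int :=
  let (ncs, nus, ncf, nuf) := st
  let ri := (PySem.List.pyGet? r i).getD 0
  let si := (PySem.List.pyGet? s i).getD 0
  if ri == 0 then
    if si == 1 then (ncs + 1, nus, ncf, nuf) else (ncs, nus + 1, ncf, nuf)
  else
    if si == 1 then (ncs, nus, ncf + 1, nuf) else (ncs, nus, ncf, nuf + 1)

def count (s : List Int) (r : List Int) : Int × Int × Int × Int × Int × Int × Int × Int × Int :=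
  let st := (PySem.List.pyRange 0 ((s.length : Int) - 1) 1).foldl (countStepA s r) (0, 0, 0, 0)
  let (ncs, nus, ncf, nuf) := st
  let nc := ncs + ncf
  let nu := nus + nuf
  let ns := ncs + nus
  let nf := ncf + nuf
  let n := nc + nu
  (ncs, nus, ncf, nuf, nc, nu, ns, nf, n)

-- ===== PORT B =====
-- pairs = [(s[i], r[i]) for i in range(len(s)-1)]; same totalisation of indexing as A's port.
def countPairs (s : List Int) (r : List Int) : List (Int × Int) :=
  (PySem.List.pyRange 0 ((s.length : Int) - 1) 1).map
    (fun i => ((PySem.List.pyGet? s i).getD 0, (PySem.List.pyGet? r i).getD 0))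

-- sum(1 for si, ri in pairs if cond) ported as a filtered count
def countCell (pairs : List (Int × Int)) (f : Int × Int → Bool) : Int :=
  ((pairs.countP f : Nat) : Int)

def count_alt (s : List Int) (r : List Int) : Int × Int × Int × Int × Int × Int × Int × Int × Int :=
  let pairs := countPairs s r
  let ncs := countCell pairs (fun p => p.1 == 1 && p.2 == 0)
  let nus := countCell pairs (fun p => !(p.1 == 1) && p.2 == 0)
  let ncf := countCell pairs (fun p => p.1 == 1 && !(p.2 == 0))
  let nuf := countCell pairs (fun p => !(p.1 == 1) && !(p.2 == 0))
  let nc := ncs + ncf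
  let nu := nus + nuf
  let ns := ncs + nus
  let nf := ncf + nuf
  let n := nc + nu
  (ncs, nus, ncf, nuf, nc, nu, ns, nf, n)

-- ===== PRECONDITION & SPEC =====
-- Pre_ excludes exactly the inputs where r is shorter than len(s)-1: there both A and B raise IndexError at r[i].
def Pre_count (s : List Int) (r : List Int) : Prop := s.length ≤ r.length + 1
instance (s : List Int) (r : List Int) : Decidable (Pre_count s r) := by unfold Pre_count; infer_instance
def pvWitness_count : List Int × List Int := ([1, 0, 1, 2], [0, 1, 0, 0])
def Spec_count (s : List Int) (r : List Int) (out : Int × Int × Int × Int × Int × Int × Int × Int × Int) : Prop := out = count_alt s r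
instance (s : List Int) (r : List Int) (out : Int × Int × Int × Int × Int × Int × Int × Int × Int) : Decidable (Spec_count s r out) := (@instDecidableEqProd _ _ _ (@instDecidableEqProd _ _ _ (@instDecidableEqProd _ _ _ (@instDecidableEqProd _ _ _ (@instDecidableEqProd _ _ _ (@instDecidableEqProd _ _ _ (@instDecidableEqProd _ _ _ instDecidableEqProd))))))) out (count_alt s r)

-- ===== CLAIM =====
def Claim_equal_count : Prop := ∀ (s : List Int) (r : List Int), Dom_count s r → Pre_count s r → Spec_count s r (count s r)

-- ===== LEMMAS AND PROOFS =====

-- A's fold over an arbitrary index list adds, to each component of the start state, the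
-- corresponding filtered count of B over the mapped pair list.
theorem countFoldA_eq (s r : List Int) (l : List Int) (a b c d : Int) :
    l.foldl (countStepA s r) (a, b, c, d) =
      (a + countCell (l.map (fun i => ((PySem.List.pyGet? s i).getD 0, (PySem.List.pyGet? r i).getD 0))) (fun p => p.1 == 1 && p.2 == 0),
       b + countCell (l.map (fun i => ((PySem.List.pyGet? s i).getD 0, (PySem.List.pyGet? r i).getD 0))) (fun p => !(p.1 == 1) && p.2 == 0),
       c + countCell (l.map (fun i => ((PySem.List.pyGet? s i).getD 0, (PySem.List.pyGet? r i).getD 0))) (fun p => p.1 == 1 && !(p.2 == 0)),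
       d + countCell (l.map (fun i => ((PySem.List.pyGet? s i).getD 0, (PySem.List.pyGet? r i).getD 0))) (fun p => !(p.1 == 1) && !(p.2 == 0))) := by
  induction l generalizing a b c d with
  | nil => simp [countCell]
  | cons x xs ih =>
    simp only [List.foldl_cons, List.map_cons, countStepA]
    by_cases hr : (PySem.List.pyGet? r x).getD 0 = 0 <;>
      by_cases hs : (PySem.List.pyGet? s x).getD 0 = 1 <;>
        simp [hr, hs, ih, countCell, Prod.mk.injEq] <;> omega

-- The differential harness compares the ports with `decide (count … = <literal>)`; default instance
-- search cannot assemble DecidableEq of this 9-fold product within its budget, so this reducible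
-- name carries a hand-nested instance for that plain equality. Proof-side only.
abbrev Spec_eqTuple9 (x y : Int × Int × Int × Int × Int × Int × Int × Int × Int) : Prop := x = y
instance (x y : Int × Int × Int × Int × Int × Int × Int × Int × Int) : Decidable (Spec_eqTuple9 x y) :=
  (@instDecidableEqProd _ _ _ (@instDecidableEqProd _ _ _ (@instDecidableEqProd _ _ _ (@instDecidableEqProd _ _ _ (@instDecidableEqProd _ _ _ (@instDecidableEqProd _ _ _ (@instDecidableEqProd _ _ _ instDecidableEqProd))))))) x y

-- ===== VERDICT =====
theorem count_spec : Claim_equal_count := by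
  intro s r _ _
  unfold Spec_count count count_alt countPairs
  rw [countFoldA_eq]
  simp
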